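-- pv_equiv track=rewrite | github.com/chris-kremer/chris-kremer.github.io | import_goodreads.py | yaml_str
-- ===== SOURCE A (Python) =====
-- def yaml_str(text):
--     """Return a safely quoted YAML string value."""
--     if not text:
--         return '""'
--     # Characters that require quoting in YAML
--     needs_quote = any(
--         c in text for c in ':#{}[]|>&*!,%\'"@`\\'
--     ) or text[0] in "-?|>"
--     if needs_quote:
--         escaped = text.replace("\\", "\\\\").replace('"', '\\"')
--         return f'"{escaped}"'
--     return text
-- ===== SOURCE B (Python) =====
-- SPECIALS = frozenset(':#{}[]|>&*!,%\'"@`\\')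
--
--
-- def yaml_str(text):
--     """Return a safely quoted YAML string value."""
--     if not text:
--         return '""'
--     # One pass over text against a prebuilt set, instead of one scan of
--     # text per special character; escaping is done in the same style,
--     # one pass building the output, instead of two chained replace passes.
--     if text[0] in "-?|>" or any(c in SPECIALS for c in text):
--         out = ['"']
--         for c in text:
--             if c == '\\':
--                 out.append('\\\\')
--             elif c == '"':
--                 out.append('\\"')
--             else:
--                 out.append(c)
--         out.append('"')
--         return ''.join(out)
--     return text
-- ===== Notes on version B (the rewrite author's own statement) =====
-- stated objective: alternative
-- what changed: Detection scans text once against a prebuilt set of special characters instead of scanning text once per special character, and escaping builds the quoted output in a single pass over the characters instead of two chained str.replace passes.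
import Mathlib
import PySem

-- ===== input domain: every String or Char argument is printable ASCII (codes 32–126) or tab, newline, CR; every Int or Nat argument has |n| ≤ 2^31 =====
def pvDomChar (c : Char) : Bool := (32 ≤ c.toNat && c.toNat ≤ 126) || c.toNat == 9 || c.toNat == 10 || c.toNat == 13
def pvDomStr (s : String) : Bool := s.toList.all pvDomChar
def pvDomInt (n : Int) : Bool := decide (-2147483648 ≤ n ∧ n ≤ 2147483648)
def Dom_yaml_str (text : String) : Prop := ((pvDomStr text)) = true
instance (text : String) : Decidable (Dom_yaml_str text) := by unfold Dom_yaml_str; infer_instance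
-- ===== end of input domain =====

-- B changes detection to a single pass over text against a prebuilt special-character set
-- and builds the escaped output in one pass instead of two chained replaces (alternative, same cost class).

-- ===== PORT A =====
-- the special characters, in A's order
def yamlSpecialsA : List Char := ":#{}[]|>&*!,%'\"@`\\".toList

def yaml_str (text : String) : String :=
  if text = "" then "\"\""
  else
    let needs_quote :=
      (yamlSpecialsA.any (fun c => PySem.Str.isIn (String.ofList [c]) text))
      || (match text.toList with
          | [] => false
          | c :: _ => PySem.Chars.isIn [c] "-?|>".toList)
    if needs_quote then
      let escaped := PySem.Str.replace (PySem.Str.replace text "\\" "\\\\") "\"" "\\\""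
      String.ofList ('"' :: escaped.toList ++ ['"'])
    else text

-- ===== PORT B =====
-- SPECIALS = frozenset(...), built once
def yamlSpecialsB : PySem.Set Char := PySem.Set.ofList ":#{}[]|>&*!,%'\"@`\\".toList

def yamlEscChar (c : Char) : List Char :=
  if c = '\\' then ['\\', '\\'] else if c = '"' then ['\\', '"'] else [c]

def yaml_str_alt (text : String) : String :=
  if text = "" then "\"\""
  else
    if (match text.toList with
        | [] => false
        | c :: _ => PySem.Chars.isIn [c] "-?|>".toList)
       || text.toList.any (fun c => PySem.Set.contains yamlSpecialsB c) then
      String.ofList ('"' :: text.toList.flatMap yamlEscChar ++ ['"'])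
    else text

-- ===== PRECONDITION & SPEC =====
def Spec_yaml_str (text : String) (out : String) : Prop := out = yaml_str_alt text
instance (text : String) (out : String) : Decidable (Spec_yaml_str text out) := by unfold Spec_yaml_str; infer_instance

-- ===== CLAIM (what is proved, stated in full; the proofs are below) =====
def Claim_equal_yaml_str : Prop := ∀ (text : String), Dom_yaml_str text → Spec_yaml_str text (yaml_str text)

-- ===== LEMMAS AND PROOFS =====

-- a single character is an infix exactly when it is a member
theorem singleton_infix_iff (c : Char) (s : List Char) : [c] <:+: s ↔ c ∈ s := by
  constructor
  · intro h; exact h.subset (List.mem_singleton_self c)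
  · intro h
    obtain ⟨l1, l2, rfl⟩ := List.append_of_mem h
    exact ⟨l1, l2, by simp⟩

-- membership of a single character as a substring is list membership
theorem isIn_singleton (c : Char) (s : List Char) :
    PySem.Chars.isIn [c] s = decide (c ∈ s) := by
  rw [Bool.eq_iff_iff, PySem.Chars.isIn_iff_infix, singleton_infix_iff]
  simp

-- replace with a single-character pattern is a per-character flatMap
theorem replace_go_singleton (x : Char) (new : List Char) :
    ∀ (fuel : Nat) (l acc : List Char), l.length ≤ fuel →
      PySem.Chars.replace.go [x] new fuel l acc
        = acc.reverse ++ l.flatMap (fun c => if c = x then new else [c]) := by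
  intro fuel
  induction fuel with
  | zero =>
    intro l acc h
    have : l = [] := List.eq_nil_of_length_eq_zero (Nat.le_zero.1 h)
    subst this
    simp [PySem.Chars.replace.go]
  | succ n ih =>
    intro l acc h
    cases l with
    | nil => simp [PySem.Chars.replace.go]
    | cons c t =>
      simp only [PySem.Chars.replace.go]
      by_cases hc : c = x
      · subst hc
        have hp : List.isPrefixOf [c] (c :: t) = true := by simp [List.isPrefixOf]
        rw [if_pos hp]
        rw [ih _ _ (by simpa using Nat.le_of_succ_le_succ h)]
        simp
      · have hp : List.isPrefixOf [x] (c :: t) = false := by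
          simp [List.isPrefixOf]
          intro hx; exact absurd hx.symm hc
        rw [if_neg (by simp [hp])]
        rw [ih _ _ (by simpa using Nat.le_of_succ_le_succ h)]
        simp [hc]

theorem replace_singleton (x : Char) (new s : List Char) :
    PySem.Chars.replace s [x] new = s.flatMap (fun c => if c = x then new else [c]) := by
  rw [PySem.Chars.replace]
  simp only [List.isEmpty_cons]
  simpa using replace_go_singleton x new s.length s [] (le_refl _)

theorem escape_chain (s : List Char) :
    PySem.Chars.replace (PySem.Chars.replace s ['\\'] ['\\', '\\']) ['"'] ['\\', '"']
      = s.flatMap yamlEscChar := by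
  rw [replace_singleton, replace_singleton, List.flatMap_assoc]
  apply List.flatMap_congr  -- may not exist; fallback below
  intro c _
  by_cases h1 : c = '\\'
  · subst h1; simp [yamlEscChar]
  · by_cases h2 : c = '"'
    · subst h2; simp [yamlEscChar]
    · simp [h1, h2, yamlEscChar]

-- the two detection conditions agree
theorem contains_specials (c : Char) :
    PySem.Set.contains yamlSpecialsB c = decide (c ∈ yamlSpecialsA) := by
  rw [Bool.eq_iff_iff]
  simp [PySem.Set.contains, yamlSpecialsB, yamlSpecialsA, PySem.Set.mem_ofList]

theorem detect_eq (cs : List Char) :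
    (yamlSpecialsA.any (fun c => PySem.Chars.isIn [c] cs))
      = cs.any (fun c => PySem.Set.contains yamlSpecialsB c) := by
  simp only [isIn_singleton, contains_specials]
  rw [Bool.eq_iff_iff]
  simp only [List.any_eq_true, decide_eq_true_eq]
  exact ⟨fun ⟨c, h1, h2⟩ => ⟨c, h2, h1⟩, fun ⟨c, h1, h2⟩ => ⟨c, h2, h1⟩⟩

-- ===== VERDICT (by name: the statement is the Claim_ definition above) =====
theorem pvToList_mk (l : List Char) : (String.ofList l).toList = l := by simp

theorem yaml_str_spec : Claim_equal_yaml_str := by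
  intro text _
  unfold Spec_yaml_str yaml_str yaml_str_alt
  by_cases h0 : text = ""
  · simp [h0]
  · rw [if_neg h0, if_neg h0]
    have hesc : (PySem.Str.replace (PySem.Str.replace text "\\" "\\\\") "\"" "\\\"").toList
        = text.toList.flatMap yamlEscChar := by
      simp only [PySem.Str.toList_replace]
      exact escape_chain text.toList
    simp only [PySem.Str.isIn_eq, pvToList_mk, hesc, detect_eq text.toList]
    rw [Bool.or_comm]
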